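-- pv_equiv track=rewrite | github.com/kwizrr/plugin.video.watchnixtoons2 | lib/client.py | catalogFromIterable
-- ===== SOURCE A (Python) =====
-- from string import ascii_uppercase
--
-- CATALOG_PAGE_SIZE = 15 # Default: 15 scraped items per page, with 2 requests per item (1 for add-on, 1 for Kodi thumbnail).
--
-- def catalogFromIterable(iterable):
--     catalog = {key: [ [ ] ] for key in ascii_uppercase + '#'}
--     for item in iterable:
--         itemKey = item[1][0].upper()
--         section = catalog[itemKey] if itemKey in catalog else catalog['#']
--         currentPage = section[-1]
--         currentPage.append(item) if len(currentPage) <= CATALOG_PAGE_SIZE else section.append( [item] )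
--     return catalog
-- ===== SOURCE B (Python) =====
-- from string import ascii_uppercase
--
-- def catalogFromIterable(iterable):
--     # One pass to group items by catalog key, then cut each group into pages of 16.
--     groups = {}
--     for item in iterable:
--         char = item[1][0].upper()
--         key = char if char in ascii_uppercase else '#'
--         groups.setdefault(key, []).append(item)
--     catalog = {}
--     for key in ascii_uppercase + '#':
--         pages = []
--         g = groups.get(key, [])
--         while len(g) > 16:
--             pages.append(g[:16])
--             g = g[16:]
--         pages.append(g)
--         catalog[key] = pages
--     return catalog
-- ===== Notes on version B (the rewrite author's own statement) =====
-- stated objective: alternative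
-- what changed: A threads every item through a 27-key dict, growing the right section's last page in place; B first groups items by key in one pass and then cuts each group into pages of 16 with a separate chunking loop (empty groups keep [[]]).
import Mathlib
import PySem

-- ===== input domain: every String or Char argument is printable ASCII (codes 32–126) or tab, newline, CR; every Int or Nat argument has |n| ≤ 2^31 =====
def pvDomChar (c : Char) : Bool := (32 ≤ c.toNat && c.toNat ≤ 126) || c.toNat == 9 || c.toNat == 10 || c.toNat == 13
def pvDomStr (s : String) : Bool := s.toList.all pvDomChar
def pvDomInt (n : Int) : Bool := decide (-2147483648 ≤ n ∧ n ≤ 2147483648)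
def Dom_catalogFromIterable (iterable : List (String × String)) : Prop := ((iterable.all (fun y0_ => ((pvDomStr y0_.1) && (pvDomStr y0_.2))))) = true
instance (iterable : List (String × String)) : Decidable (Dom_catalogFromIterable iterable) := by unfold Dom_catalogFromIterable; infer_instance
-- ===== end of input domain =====

-- B replaces A's incremental per-item pagination of a 27-key dict by a group-then-chunk
-- decomposition (one grouping pass, then each group cut into pages of 16); alternative, same cost.

-- ascii_uppercase + '#', the fixed catalog key order (module constant in the Python source)
def pvKeys : List String :=
  ["A","B","C","D","E","F","G","H","I","J","K","L","M","N","O","P","Q","R","S",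
   "T","U","V","W","X","Y","Z","#"]

-- ===== PORT A =====
-- A's loop body on one sec: append to the last page while it has ≤ 15 items, else start a new page
def pvStepPage (sec : List (List (String × String))) (item : String × String) :
    List (List (String × String)) :=
  let currentPage := (PySem.List.pyGet? sec (-1)).getD []
  if currentPage.length ≤ 15 then sec.dropLast ++ [currentPage ++ [item]]
  else sec ++ [[item]]

def catalogFromIterable (iterable : List (String × String)) :
    List (String × List (List (String × String))) :=
  let catalog : PySem.Dict String (List (List (String × String))) :=
    pvKeys.foldl (fun d key => d.insert key [[]]) PySem.Dict.empty
  let final := iterable.foldl (fun catalog item =>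
    -- item[1][0].upper(); Pre_ excludes item[1] = "" (IndexError), where .getD ' ' is unreached
    let itemKey : String := String.ofList [PySem.Chars.upperChar ((PySem.Str.pyGet? item.2 0).getD ' ')]
    let key := if catalog.contains itemKey then itemKey else "#"
    -- sec aliases catalog[key]; the in-place append mutation is the modify below
    catalog.modify key [] (fun sec => pvStepPage sec item)) catalog
  final.items

-- ===== PORT B =====
-- Source B's while-loop: cut g into pages of 16, the (possibly empty) remainder is the last page
def pvChunks (pages : List (List (String × String))) (g : List (String × String)) :
    List (List (String × String)) :=
  if _h : 16 < g.length then
    pvChunks (pages ++ [PySem.List.slice g none (some 16)]) (PySem.List.slice g (some 16) none)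
  else pages ++ [g]
termination_by g.length
decreasing_by
  rw [PySem.List.slice_from g (a := 16) (by norm_num)]
  simp only [List.length_drop]
  omega

def catalogFromIterable_alt (iterable : List (String × String)) :
    List (String × List (List (String × String))) :=
  let groups : PySem.Dict String (List (String × String)) :=
    iterable.foldl (fun d item =>
      let char := PySem.Chars.upperChar ((PySem.Str.pyGet? item.2 0).getD ' ')
      let key := if PySem.Str.isIn (String.ofList [char]) "ABCDEFGHIJKLMNOPQRSTUVWXYZ"
                 then String.ofList [char] else "#"
      -- groups.setdefault(key, []).append(item): d[key] = d.get(key, []) + [item]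
      d.modify key [] (fun g => g ++ [item])) PySem.Dict.empty
  let catalog : PySem.Dict String (List (List (String × String))) :=
    pvKeys.foldl (fun d key => d.insert key (pvChunks [] (groups.getD key []))) PySem.Dict.empty
  catalog.items

-- ===== PRECONDITION & SPEC =====
-- Pre_ excludes items whose second string is empty: there item[1][0] raises IndexError in A (and in B).
def Pre_catalogFromIterable (iterable : List (String × String)) : Prop :=
  ∀ it ∈ iterable, it.2 ≠ ""
instance (iterable : List (String × String)) : Decidable (Pre_catalogFromIterable iterable) := by
  unfold Pre_catalogFromIterable; infer_instance

def pvWitness_catalogFromIterable : (List (String × String)) :=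
  [("ep1", "Naruto"), ("ep2", "bleach"), ("ep3", "91 Days")]

def Spec_catalogFromIterable (iterable : List (String × String)) (out : List (String × List (List (String × String)))) : Prop := out = catalogFromIterable_alt iterable
instance (iterable : List (String × String)) (out : List (String × List (List (String × String)))) : Decidable (Spec_catalogFromIterable iterable out) := by unfold Spec_catalogFromIterable; infer_instance

-- ===== CLAIM (what is proved, stated in full; the proofs are below) =====
def Claim_equal_catalogFromIterable : Prop := ∀ (iterable : List (String × String)), Dom_catalogFromIterable iterable → Pre_catalogFromIterable iterable → Spec_catalogFromIterable iterable (catalogFromIterable iterable)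

-- ===== LEMMAS AND PROOFS =====

-- the common key function: B's key expression (A computes the same key, see pvKeyA_eq)
def pvKeyOf (it : String × String) : String :=
  let char := PySem.Chars.upperChar ((PySem.Str.pyGet? it.2 0).getD ' ')
  if PySem.Str.isIn (String.ofList [char]) "ABCDEFGHIJKLMNOPQRSTUVWXYZ"
  then String.ofList [char] else "#"

lemma pvMem_keys_iff (c : Char) :
    String.ofList [c] ∈ pvKeys ↔ c ∈ "ABCDEFGHIJKLMNOPQRSTUVWXYZ".toList ∨ c = '#' := by
  simp [pvKeys, String.ext_iff]
  constructor
  · rintro (h|h|h|h|h|h|h|h|h|h|h|h|h|h|h|h|h|h|h|h|h|h|h|h|h|h|h) <;> simp [h]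
  · rintro ((h|h|h|h|h|h|h|h|h|h|h|h|h|h|h|h|h|h|h|h|h|h|h|h|h|h)|h) <;> simp [h]

lemma pvIsIn_iff (c : Char) :
    PySem.Str.isIn (String.ofList [c]) "ABCDEFGHIJKLMNOPQRSTUVWXYZ" = true ↔
      c ∈ "ABCDEFGHIJKLMNOPQRSTUVWXYZ".toList := by
  rw [PySem.Str.isIn_iff_infix]
  simp [List.singleton_infix_iff]

lemma pvKeyA_eq (d : PySem.Dict String (List (List (String × String)))) (hk : d.keys = pvKeys)
    (it : String × String) :
    (if d.contains (String.ofList [PySem.Chars.upperChar ((PySem.Str.pyGet? it.2 0).getD ' ')])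
     then String.ofList [PySem.Chars.upperChar ((PySem.Str.pyGet? it.2 0).getD ' ')] else "#")
      = pvKeyOf it := by
  rw [PySem.Dict.contains_eq_decide_mem_keys, hk]
  unfold pvKeyOf
  by_cases hh : PySem.Chars.upperChar ((PySem.Str.pyGet? it.2 0).getD ' ') = '#'
  · rw [hh]
    have h1 : String.ofList ['#'] ∈ pvKeys := by decide
    simp [h1]
  · simp only [pvMem_keys_iff, pvIsIn_iff, hh, or_false, decide_eq_true_eq]

lemma pvKeyOf_mem (it : String × String) : pvKeyOf it ∈ pvKeys := by
  by_cases h : PySem.Str.isIn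
      (String.ofList [PySem.Chars.upperChar ((PySem.Str.pyGet? it.2 0).getD ' ')])
      "ABCDEFGHIJKLMNOPQRSTUVWXYZ" = true
  · simp only [pvKeyOf, h, if_true]
    exact (pvMem_keys_iff _).2 (Or.inl ((pvIsIn_iff _).1 h))
  · simp only [pvKeyOf, h, if_false, Bool.false_eq_true]
    decide

-- invariant of A's fold: keys stay pvKeys and each sec is the pvStepPage-fold of its group
lemma pvFoldA_inv (l : List (String × String))
    (d : PySem.Dict String (List (List (String × String)))) (hk : d.keys = pvKeys) :
    (l.foldl (fun catalog item =>
        let itemKey : String := String.ofList [PySem.Chars.upperChar ((PySem.Str.pyGet? item.2 0).getD ' ')]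
        let key := if catalog.contains itemKey then itemKey else "#"
        catalog.modify key [] (fun sec => pvStepPage sec item)) d).keys = pvKeys ∧
    ∀ k, (l.foldl (fun catalog item =>
        let itemKey : String := String.ofList [PySem.Chars.upperChar ((PySem.Str.pyGet? item.2 0).getD ' ')]
        let key := if catalog.contains itemKey then itemKey else "#"
        catalog.modify key [] (fun sec => pvStepPage sec item)) d).getD k []
      = (l.filter (fun it => pvKeyOf it = k)).foldl pvStepPage (d.getD k []) := by
  induction l generalizing d with
  | nil => exact ⟨hk, fun k => rfl⟩
  | cons it t ih =>
    simp only [List.foldl_cons, List.filter_cons]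
    have hkey := pvKeyA_eq d hk it
    have hcont : d.contains (pvKeyOf it) = true := by
      rw [PySem.Dict.contains_eq_decide_mem_keys, hk]
      simp [pvKeyOf_mem it]
    have hd' : (d.modify (pvKeyOf it) [] (fun sec => pvStepPage sec it)).keys = pvKeys := by
      rw [PySem.Dict.keys_modify, PySem.Dict.keys_insert_of_contains _ _ hcont, hk]
    have step_eq :
        (let itemKey : String :=
            String.ofList [PySem.Chars.upperChar ((PySem.Str.pyGet? it.2 0).getD ' ')]
         let key := if d.contains itemKey then itemKey else "#"
         d.modify key [] (fun sec => pvStepPage sec it))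
          = d.modify (pvKeyOf it) [] (fun sec => pvStepPage sec it) := by
      simp only []
      rw [hkey]
    rw [step_eq]
    obtain ⟨ihk, ihD⟩ := ih _ hd'
    refine ⟨ihk, fun k => ?_⟩
    rw [ihD k, PySem.Dict.getD_modify]
    by_cases hkk : pvKeyOf it = k
    · simp [hkk, List.foldl_cons]
    · have hkk' : ¬ (k = pvKeyOf it) := fun h => hkk h.symm
      simp [hkk, hkk']

-- page filling, one item at a time (the abstract shape shared by both proofs)
def pvFill (p : List (String × String)) (g : List (String × String)) :
    List (List (String × String)) :=
  match g with
  | [] => [p]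
  | x :: t => if _h : p.length ≤ 15 then pvFill (p ++ [x]) t else p :: pvFill [] (x :: t)
termination_by 17 * g.length + p.length
decreasing_by
  all_goals simp_all only [List.length_cons, List.length_append, List.length_nil, not_le]
  all_goals omega

lemma pvStepPage_concat (ps : List (List (String × String))) (p : List (String × String))
    (x : String × String) :
    pvStepPage (ps ++ [p]) x
      = if p.length ≤ 15 then ps ++ [p ++ [x]] else (ps ++ [p]) ++ [[x]] := by
  unfold pvStepPage
  rw [PySem.List.pyGet?_neg_one_append_singleton]
  simp

lemma pvFill_nil (p : List (String × String)) : pvFill p [] = [p] := by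
  simp [pvFill]

lemma pvFill_cons_le {p : List (String × String)} (x : String × String)
    (t : List (String × String)) (h : p.length ≤ 15) :
    pvFill p (x :: t) = pvFill (p ++ [x]) t := by
  rw [pvFill]
  simp [h]

lemma pvFill_cons_gt {p : List (String × String)} (x : String × String)
    (t : List (String × String)) (h : ¬ p.length ≤ 15) :
    pvFill p (x :: t) = p :: pvFill [] (x :: t) := by
  rw [pvFill]
  simp [h]

lemma pvFoldP_eq_fill (g : List (String × String)) :
    ∀ (ps : List (List (String × String))) (p : List (String × String)), p.length ≤ 16 →
      g.foldl pvStepPage (ps ++ [p]) = ps ++ pvFill p g := by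
  induction g with
  | nil => intro ps p _; simp [pvFill_nil]
  | cons x t ih =>
    intro ps p hp
    rw [List.foldl_cons, pvStepPage_concat]
    by_cases h15 : p.length ≤ 15
    · rw [if_pos h15, ih ps (p ++ [x]) (by simp only [List.length_append, List.length_singleton]; omega),
        pvFill_cons_le x t h15]
    · rw [if_neg h15, ih (ps ++ [p]) [x] (by simp), pvFill_cons_gt x t h15,
        pvFill_cons_le x t (by simp)]
      simp

lemma pvFill_small (g : List (String × String)) :
    ∀ p, p.length + g.length ≤ 16 → pvFill p g = [p ++ g] := by
  induction g with
  | nil => intro p _; simp [pvFill_nil]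
  | cons x t ih =>
    intro p h
    simp only [List.length_cons] at h
    rw [pvFill_cons_le x t (by omega), ih (p ++ [x]) (by simp only [List.length_append, List.length_singleton]; omega)]
    simp

lemma pvFill_big (g : List (String × String)) :
    ∀ p, p.length ≤ 16 → 16 < p.length + g.length →
      pvFill p g = (p ++ g.take (16 - p.length)) :: pvFill [] (g.drop (16 - p.length)) := by
  induction g with
  | nil => intro p h1 h2; simp at h2; omega
  | cons x t ih =>
    intro p h1 h2
    simp only [List.length_cons] at h2
    by_cases h15 : p.length ≤ 15
    · rw [pvFill_cons_le x t h15,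
        ih (p ++ [x]) (by simp only [List.length_append, List.length_singleton]; omega) (by simp only [List.length_append, List.length_singleton]; omega)]
      have e : 16 - p.length = (15 - p.length) + 1 := by omega
      have e' : 16 - (p ++ [x]).length = 15 - p.length := by simp only [List.length_append, List.length_singleton]; omega
      rw [e, e', List.take_succ_cons, List.drop_succ_cons]
      simp
    · have h16 : p.length = 16 := by omega
      rw [pvFill_cons_gt x t h15]
      simp [h16]

lemma pvChunks_eq_fill (pages : List (List (String × String))) (g : List (String × String)) :
    pvChunks pages g = pages ++ pvFill [] g := by
  induction pages, g using pvChunks.induct with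
  | case1 pages g hg ih =>
    rw [pvChunks, dif_pos hg, ih,
      PySem.List.slice_to g (b := 16) (by norm_num),
      PySem.List.slice_from g (a := 16) (by norm_num),
      pvFill_big g [] (by simp) (by simpa using hg)]
    have ht : Int.toNat 16 = 16 := rfl
    simp [ht]
  | case2 pages g hg =>
    rw [pvChunks, dif_neg hg,
      pvFill_small g [] (by simp only [List.length_nil, Nat.zero_add]; omega)]
    simp

lemma pvPages_eq (g : List (String × String)) :
    g.foldl pvStepPage [[]] = pvChunks [] g := by
  have h := pvFoldP_eq_fill g [] [] (by simp)
  rw [pvChunks_eq_fill]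
  simpa using h

lemma pvGroups_getD_gen (l : List (String × String)) :
    ∀ (d : PySem.Dict String (List (String × String))) (k : String),
    (l.foldl (fun d item =>
        let char := PySem.Chars.upperChar ((PySem.Str.pyGet? item.2 0).getD ' ')
        let key := if PySem.Str.isIn (String.ofList [char]) "ABCDEFGHIJKLMNOPQRSTUVWXYZ"
                   then String.ofList [char] else "#"
        d.modify key [] (fun g => g ++ [item])) d).getD k []
      = d.getD k [] ++ l.filter (fun it => pvKeyOf it = k) := by
  induction l with
  | nil => intro d k; simp
  | cons it t ih =>
    intro d k
    simp only [List.foldl_cons, List.filter_cons]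
    have step_eq :
        (let char := PySem.Chars.upperChar ((PySem.Str.pyGet? it.2 0).getD ' ')
         let key := if PySem.Str.isIn (String.ofList [char]) "ABCDEFGHIJKLMNOPQRSTUVWXYZ"
                    then String.ofList [char] else "#"
         d.modify key [] (fun g => g ++ [it]))
          = d.modify (pvKeyOf it) [] (fun g => g ++ [it]) := rfl
    rw [step_eq, ih, PySem.Dict.getD_modify]
    by_cases hkk : pvKeyOf it = k
    · subst hkk; simp
    · have hkk' : ¬ (k = pvKeyOf it) := fun h => hkk h.symm
      simp [hkk, hkk']

lemma pvGroups_getD (l : List (String × String)) (k : String) :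
    (l.foldl (fun d item =>
        let char := PySem.Chars.upperChar ((PySem.Str.pyGet? item.2 0).getD ' ')
        let key := if PySem.Str.isIn (String.ofList [char]) "ABCDEFGHIJKLMNOPQRSTUVWXYZ"
                   then String.ofList [char] else "#"
        d.modify key [] (fun g => g ++ [item])) PySem.Dict.empty).getD k []
      = l.filter (fun it => pvKeyOf it = k) := by
  rw [pvGroups_getD_gen l PySem.Dict.empty k]
  simp

lemma pvCatalogItems (G : PySem.Dict String (List (String × String))) :
    (pvKeys.foldl (fun d key => d.insert key (pvChunks [] (G.getD key [])))
        PySem.Dict.empty).items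
      = pvKeys.map (fun k => (k, pvChunks [] (G.getD k []))) := by
  have h := PySem.Dict.items_foldl_insert_fresh (l := pvKeys) (k := fun a => a)
    (v := fun a => pvChunks [] (G.getD a [])) (d := PySem.Dict.empty)
    (fun a _ => PySem.Dict.contains_empty a) (by simpa using (by decide : pvKeys.Nodup))
  simpa using h

lemma pvAltItems (l : List (String × String)) :
    catalogFromIterable_alt l
      = pvKeys.map (fun k => (k, pvChunks [] (l.filter (fun it => pvKeyOf it = k)))) := by
  unfold catalogFromIterable_alt
  rw [pvCatalogItems]
  exact List.map_congr_left (fun k _ => by rw [pvGroups_getD])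

lemma pvAItems (l : List (String × String)) :
    catalogFromIterable l
      = pvKeys.map (fun k => (k, (l.filter (fun it => pvKeyOf it = k)).foldl pvStepPage [[]])) := by
  unfold catalogFromIterable
  have hkinit : (pvKeys.foldl (fun d key => d.insert key [[]])
      (PySem.Dict.empty (κ := String) (ν := List (List (String × String))))).keys = pvKeys := by
    decide
  obtain ⟨hks, hgd⟩ := pvFoldA_inv l _ hkinit
  have hnd : ∀ (d : PySem.Dict String (List (List (String × String)))),
      d.keys = pvKeys → d.keys.Nodup := fun d h => by rw [h]; decide
  rw [PySem.Dict.items_eq_map_keys _ (hnd _ hks) [], hks]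
  refine List.map_congr_left (fun k hk => ?_)
  rw [hgd k]
  have hinit : ∀ k ∈ pvKeys, (pvKeys.foldl (fun d key => d.insert key [[]])
      (PySem.Dict.empty (κ := String) (ν := List (List (String × String))))).getD k [] = [[]] := by
    decide
  rw [hinit k hk]

-- ===== VERDICT (by name: the statement is the Claim_ definition above) =====
theorem catalogFromIterable_spec : Claim_equal_catalogFromIterable := by
  intro iterable _ _
  unfold Spec_catalogFromIterable
  rw [pvAItems, pvAltItems]
  exact List.map_congr_left (fun k _ => by rw [pvPages_eq])
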